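-- pv_equiv track=rewrite | github.com/Akhan521/Interview-Prep | CodePath TIP-102/Unit 3/Day 2/complete_designs.py | time_to_complete_dream_designs
-- ===== SOURCE A (Python) =====
-- def time_to_complete_dream_designs(design_times):
--     n = len(design_times)
--     answer = [0] * n
--     stack = []
--
--     for i in range(n):
--         while stack and design_times[i] > design_times[stack[-1]]:
--             index = stack.pop()
--             answer[index] = i - index
--         stack.append(i)
--
--     return answer
-- ===== SOURCE B (Python) =====
-- def time_to_complete_dream_designs(design_times):
--     n = len(design_times)
--     return [next((j - i for j in range(i + 1, n) if design_times[j] > design_times[i]), 0)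
--             for i in range(n)]
-- ===== Notes on version B (the rewrite author's own statement) =====
-- stated objective: simpler
-- what changed: Replaces the monotonic-stack one-pass with a direct per-index forward scan for the first strictly larger later value, as a one-line comprehension with no answer array or stack.
import Mathlib
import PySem

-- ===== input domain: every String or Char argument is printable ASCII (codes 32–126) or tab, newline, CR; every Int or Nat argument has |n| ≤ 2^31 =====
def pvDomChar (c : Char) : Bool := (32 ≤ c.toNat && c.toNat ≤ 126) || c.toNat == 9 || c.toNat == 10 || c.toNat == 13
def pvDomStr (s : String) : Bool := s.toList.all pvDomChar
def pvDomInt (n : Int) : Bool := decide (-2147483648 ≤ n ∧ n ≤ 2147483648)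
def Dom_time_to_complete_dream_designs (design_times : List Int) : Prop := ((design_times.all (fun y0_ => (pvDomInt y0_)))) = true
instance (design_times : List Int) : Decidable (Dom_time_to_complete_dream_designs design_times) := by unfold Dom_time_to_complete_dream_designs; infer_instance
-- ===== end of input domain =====

-- B replaces A's monotonic-stack pass by a direct per-index forward scan for the first later, strictly larger value (objective: simpler; not faster).


-- ===== PORT A =====
-- the inner 'while stack and t[i] > t[stack[-1]]' loop; the stack is kept top-first
-- (append = cons, pop = behead).  All indices reaching t[...] come from range(n) or were
-- pushed from it, hence are in range, so 't.getD j 0' is exact for Python's t[j] here.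
def pvPopA (t : List Int) (i : Nat) (answer : List Int) : List Nat → List Int × List Nat
  | [] => (answer, [])
  | top :: rest =>
    if t.getD top 0 < t.getD i 0 then
      pvPopA t i (answer.set top ((i : Int) - (top : Int))) rest
    else (answer, top :: rest)

def time_to_complete_dream_designs (design_times : List Int) : List Int :=
  let n := design_times.length
  ((List.range n).foldl
    (fun (st : List Int × List Nat) i =>
      let st' := pvPopA design_times i st.1 st.2
      (st'.1, i :: st'.2))
    (List.replicate n 0, [])).1

-- ===== PORT B =====
-- first j in [j0, n) with t[j] > t[i], returned as j - i, else 0 (the generator with default 0)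
def pvNextB (t : List Int) (i j : Nat) : Int :=
  if j < t.length then
    (if t.getD i 0 < t.getD j 0 then (j : Int) - (i : Int) else pvNextB t i (j + 1))
  else 0
termination_by t.length - j

def time_to_complete_dream_designs_alt (design_times : List Int) : List Int :=
  (List.range design_times.length).map (fun i => pvNextB design_times i (i + 1))

-- ===== PRECONDITION & SPEC =====
def Spec_time_to_complete_dream_designs (design_times : List Int) (out : List Int) : Prop := out = time_to_complete_dream_designs_alt design_times
instance (design_times : List Int) (out : List Int) : Decidable (Spec_time_to_complete_dream_designs design_times out) := by unfold Spec_time_to_complete_dream_designs; infer_instance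

-- ===== CLAIM (what is proved, stated in full; the proofs are below) =====
def Claim_equal_time_to_complete_dream_designs : Prop := ∀ (design_times : List Int), Dom_time_to_complete_dream_designs design_times → Spec_time_to_complete_dream_designs design_times (time_to_complete_dream_designs design_times)

-- ===== LEMMAS AND PROOFS =====

-- loop invariant of A's pass, at the point where indices < i have been processed:
-- answer agrees with B on finished indices, is still 0 on stacked/unseen ones, and the
-- stack holds decreasing indices each dominating everything strictly between it and i.
def pvInv (t : List Int) (i : Nat) (a : List Int) (stk : List Nat) : Prop :=
  a.length = t.length ∧
  List.Pairwise (· > ·) stk ∧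
  (∀ j ∈ stk, j < i) ∧
  (∀ j ∈ stk, ∀ j', j < j' → j' < i → t.getD j' 0 ≤ t.getD j 0) ∧
  (∀ k, k < t.length →
    a.getD k 0 = if k ∈ stk ∨ i ≤ k then 0 else pvNextB t k (k + 1))

lemma pvNextB_none (t : List Int) (k : Nat) :
    ∀ m s, t.length ≤ s + m →
      (∀ j, s ≤ j → j < t.length → t.getD j 0 ≤ t.getD k 0) → pvNextB t k s = 0 := by
  intro m
  induction m with
  | zero =>
    intro s hm _
    rw [pvNextB, if_neg (by omega)]
  | succ m ih =>
    intro s hm h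
    rw [pvNextB]
    by_cases hs : s < t.length
    · rw [if_pos hs, if_neg (not_lt.mpr (h s le_rfl hs))]
      exact ih (s + 1) (by omega) (fun j hj hjn => h j (by omega) hjn)
    · rw [if_neg hs]

lemma pvNextB_hit (t : List Int) (k i : Nat) (hi : i < t.length)
    (hgt : t.getD k 0 < t.getD i 0) :
    ∀ m s, i ≤ s + m → s ≤ i →
      (∀ j, s ≤ j → j < i → t.getD j 0 ≤ t.getD k 0) →
      pvNextB t k s = (i : Int) - (k : Int) := by
  intro m
  induction m with
  | zero =>
    intro s hm hsi _
    have hs : s = i := by omega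
    subst hs
    rw [pvNextB, if_pos hi, if_pos hgt]
  | succ m ih =>
    intro s hm hsi h
    by_cases hs : s = i
    · subst hs
      rw [pvNextB, if_pos hi, if_pos hgt]
    · have hlt : s < i := lt_of_le_of_ne hsi hs
      rw [pvNextB, if_pos (by omega), if_neg (not_lt.mpr (h s le_rfl hlt))]
      exact ih (s + 1) (by omega) (by omega) (fun j hj hji => h j (by omega) hji)

lemma pvPopA_inv (t : List Int) (i : Nat) (hi : i < t.length) :
    ∀ stk a, pvInv t i a stk →
      pvInv t (i + 1) (pvPopA t i a stk).1 (i :: (pvPopA t i a stk).2) := by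
  intro stk
  induction stk with
  | nil =>
    intro a h
    obtain ⟨hlen, _, _, _, hans⟩ := h
    simp only [pvPopA]
    refine ⟨hlen, by simp, by simp, ?_, ?_⟩
    · intro j hj j' h1 h2
      rcases List.mem_cons.mp hj with rfl | h
      · exact absurd h2 (by omega)
      · exact absurd h (by simp)
    · intro k hk
      rw [hans k hk]
      refine if_congr ?_ rfl rfl
      simp only [List.not_mem_nil, false_or, List.mem_cons, or_false]
      omega
  | cons top rest ih =>
    intro a h
    obtain ⟨hlen, hpw, hlt, hvis, hans⟩ := h
    have htopi : top < i := hlt top (List.mem_cons_self ..)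
    rw [pvPopA]
    by_cases hpop : t.getD top 0 < t.getD i 0
    · rw [if_pos hpop]
      refine ih _ ⟨by simp [hlen], (List.pairwise_cons.mp hpw).2, ?_, ?_, ?_⟩
      · exact fun j hj => hlt j (List.mem_cons_of_mem _ hj)
      · exact fun j hj => hvis j (List.mem_cons_of_mem _ hj)
      · intro k hk
        by_cases hkt : k = top
        · subst hkt
          rw [List.getD_eq_getElem _ _ (by simpa using (by omega : k < a.length)),
              List.getElem_set_self]
          have hknotin : k ∉ rest := fun hmem =>
            absurd ((List.pairwise_cons.mp hpw).1 k hmem) (lt_irrefl k)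
          rw [if_neg (by push Not; exact ⟨hknotin, by omega⟩)]
          exact (pvNextB_hit t k i hi hpop (i - (k + 1)) (k + 1) (by omega) (by omega)
            (fun j hj hji => hvis k (List.mem_cons_self ..) j (by omega) hji)).symm
        · have hka : k < a.length := by rw [hlen]; omega
          have : (a.set top ((i : Int) - (top : Int))).getD k 0 = a.getD k 0 := by
            rw [List.getD_eq_getElem _ _ (by simpa using hka),
                List.getD_eq_getElem _ _ hka]
            exact List.getElem_set_ne (fun hh => hkt hh.symm) _
          rw [this, hans k hk]
          refine if_congr ?_ rfl rfl
          simp only [List.mem_cons]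
          constructor
          · rintro (h | h)
            · rcases h with h | h
              · exact absurd h hkt
              · exact Or.inl h
            · exact Or.inr h
          · rintro (h | h)
            · exact Or.inl (Or.inr h)
            · exact Or.inr h
    · rw [if_neg hpop]
      have hipos : t.getD i 0 ≤ t.getD top 0 := not_lt.mp hpop
      refine ⟨hlen, ?_, ?_, ?_, ?_⟩
      · exact List.pairwise_cons.mpr ⟨fun j hj => hlt j hj, hpw⟩
      · intro j hj
        rcases List.mem_cons.mp hj with h | h
        · omega
        · have := hlt j h; omega
      · intro j hj j' h1 h2
        rcases List.mem_cons.mp hj with h | h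
        · omega
        · by_cases hj' : j' = i
          · subst hj'
            rcases List.mem_cons.mp h with h | h
            · subst h; exact hipos
            · have hjtop : j < top := (List.pairwise_cons.mp hpw).1 j h
              exact le_trans hipos (hvis j (List.mem_cons_of_mem _ h) top hjtop htopi)
          · exact hvis j h j' h1 (by omega)
      · intro k hk
        rw [hans k hk]
        refine if_congr ?_ rfl rfl
        simp only [List.mem_cons]
        constructor
        · rintro (h | h)
          · exact Or.inl (Or.inr h)
          · rcases Nat.eq_or_lt_of_le h with h' | h'
            · exact Or.inl (Or.inl h'.symm)
            · exact Or.inr (by omega)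
        · rintro ((h | h) | h)
          · exact Or.inr (by omega)
          · exact Or.inl h
          · exact Or.inr (by omega)

lemma pvFold_inv (t : List Int) :
    ∀ m i a stk, i + m = t.length → pvInv t i a stk →
      pvInv t t.length
        (((List.range' i m).foldl
          (fun (st : List Int × List Nat) j =>
            ((pvPopA t j st.1 st.2).1, j :: (pvPopA t j st.1 st.2).2)) (a, stk)).1)
        (((List.range' i m).foldl
          (fun (st : List Int × List Nat) j =>
            ((pvPopA t j st.1 st.2).1, j :: (pvPopA t j st.1 st.2).2)) (a, stk)).2) := by
  intro m
  induction m with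
  | zero =>
    intro i a stk hm h
    simp only [List.range'_zero, List.foldl_nil]
    have : i = t.length := by omega
    subst this
    exact h
  | succ m ih =>
    intro i a stk hm h
    rw [List.range'_succ, List.foldl_cons]
    exact ih (i + 1) _ _ (by omega) (pvPopA_inv t i (by omega) stk a h)

-- ===== VERDICT (by name: the statement is the Claim_ definition above) =====
theorem time_to_complete_dream_designs_spec : Claim_equal_time_to_complete_dream_designs := by
  intro t _
  unfold Spec_time_to_complete_dream_designs time_to_complete_dream_designs
    time_to_complete_dream_designs_alt
  simp only [List.range_eq_range']
  have hinit : pvInv t 0 (List.replicate t.length 0) [] := by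
    refine ⟨by simp, by simp, by simp, by simp, ?_⟩
    intro k hk
    rw [if_pos (Or.inr (Nat.zero_le k))]
    rw [List.getD_eq_getElem _ 0 (by simpa using hk), List.getElem_replicate]
  have hfin := pvFold_inv t t.length 0 (List.replicate t.length 0) [] (by omega) hinit
  obtain ⟨hlen, _, hlt, hvis, hans⟩ := hfin
  apply List.ext_getElem
  · simp only [hlen, List.length_map, List.length_range']
  · intro k hk1 hk2
    have hkn : k < t.length := by
      have := hlen ▸ hk1
      simpa using this
    have hval : (((List.range' 0 t.length).foldl
        (fun (st : List Int × List Nat) j =>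
          ((pvPopA t j st.1 st.2).1, j :: (pvPopA t j st.1 st.2).2))
        (List.replicate t.length 0, [])).1).getD k 0
        = pvNextB t k (k + 1) := by
      rw [hans k hkn]
      by_cases hmem : k ∈ (((List.range' 0 t.length).foldl
          (fun (st : List Int × List Nat) j =>
            ((pvPopA t j st.1 st.2).1, j :: (pvPopA t j st.1 st.2).2))
          (List.replicate t.length 0, [])).2)
      · rw [if_pos (Or.inl hmem)]
        exact (pvNextB_none t k (t.length - (k + 1)) (k + 1) (by omega)
          (fun j hj hjn => hvis k hmem j (by omega) hjn)).symm
      · rw [if_neg (by push Not; exact ⟨hmem, by omega⟩)]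
    rw [← List.getD_eq_getElem _ 0 hk1, hval]
    rw [List.getElem_map, List.getElem_range']
    simp
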